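-- pv_equiv track=rewrite | github.com/anandahs/ds_and_alg | two_sum_practice.py | max_problem
-- ===== SOURCE A (Python) =====
-- def max_problem(data_list, max_type="sum"):
--     max_num1 = 0
--     max_num2 = 0
--
--     for num in data_list:
--         if num > max_num1:
--             max_num2 = max_num1
--             max_num1 = num
--         elif num > max_num2:
--             max_num2 = num
--
--     if max_type == "product":
--         return max_num1 * max_num2
--     else:
--         return max_num1 + max_num2
-- ===== SOURCE B (Python) =====
-- def max_problem(data_list, max_type="sum"):
--     top = sorted(data_list, reverse=True)
--     a = max(top[0], 0) if top else 0
--     b = max(top[1], 0) if len(top) > 1 else 0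
--     return a * b if max_type == "product" else a + b
-- ===== Notes on version B (the rewrite author's own statement) =====
-- stated objective: idiomatic
-- what changed: Replaces the hand-rolled two-tracker scan with sorting the list descending and clamping the top two entries at zero (the zero floor A's zero-initialized trackers impose).
import Mathlib
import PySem

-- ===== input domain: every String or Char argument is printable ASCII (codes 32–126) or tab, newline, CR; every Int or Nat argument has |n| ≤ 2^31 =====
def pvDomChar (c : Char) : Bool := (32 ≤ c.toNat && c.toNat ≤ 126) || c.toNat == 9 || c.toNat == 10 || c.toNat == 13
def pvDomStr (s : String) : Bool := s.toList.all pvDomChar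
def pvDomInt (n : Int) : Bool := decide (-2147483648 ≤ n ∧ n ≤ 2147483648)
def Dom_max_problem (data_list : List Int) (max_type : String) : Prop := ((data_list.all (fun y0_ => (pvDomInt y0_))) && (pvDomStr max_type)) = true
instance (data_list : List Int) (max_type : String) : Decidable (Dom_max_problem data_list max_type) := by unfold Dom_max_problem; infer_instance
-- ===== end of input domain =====

-- B replaces A's hand-rolled two-tracker scan by sorting descending and clamping the top two at 0 (idiomatic, not faster).

-- ===== PORT A =====
-- the loop body of A: update the two trackers with one element
def maxStepA (s : Int × Int) (num : Int) : Int × Int :=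
  if num > s.1 then (num, s.1)
  else if num > s.2 then (s.1, num)
  else s

def max_problem (data_list : List Int) (max_type : String) : Int :=
  let st := data_list.foldl maxStepA (0, 0)
  if max_type == "product" then st.1 * st.2 else st.1 + st.2

-- ===== PORT B =====
def max_problem_alt (data_list : List Int) (max_type : String) : Int :=
  let top := PySem.List.sorted data_list (fun x => x) true
  let a : Int := match top with | [] => 0 | x :: _ => max x 0
  let b : Int := match top with | _ :: y :: _ => max y 0 | _ => 0
  if max_type == "product" then a * b else a + b

-- ===== PRECONDITION & SPEC =====
def Spec_max_problem (data_list : List Int) (max_type : String) (out : Int) : Prop := out = max_problem_alt data_list max_type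
instance (data_list : List Int) (max_type : String) (out : Int) : Decidable (Spec_max_problem data_list max_type out) := by unfold Spec_max_problem; infer_instance

-- ===== CLAIM (what is proved, stated in full; the proofs are below) =====
def Claim_equal_max_problem : Prop := ∀ (data_list : List Int) (max_type : String), Dom_max_problem data_list max_type → Spec_max_problem data_list max_type (max_problem data_list max_type)

-- ===== LEMMAS AND PROOFS =====

-- A's tracker update is left-commutative, so the fold is permutation-invariant
theorem maxStepA_comm (s : Int × Int) (x y : Int) :
    maxStepA (maxStepA s x) y = maxStepA (maxStepA s y) x := by
  obtain ⟨m1, m2⟩ := s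
  simp only [maxStepA]
  split_ifs <;> simp_all <;> omega

-- folding over elements all ≤ both trackers changes nothing
theorem foldl_maxStepA_const (l : List Int) (a b : Int)
    (h : ∀ z ∈ l, z ≤ a ∧ z ≤ b) : l.foldl maxStepA (a, b) = (a, b) := by
  induction l with
  | nil => rfl
  | cons x t ih =>
      have hx := h x (by simp)
      have : maxStepA (a, b) x = (a, b) := by
        simp only [maxStepA]; split_ifs <;> simp_all <;> omega
      simp only [List.foldl_cons, this]
      exact ih (fun z hz => h z (by simp [hz]))

-- fold over a descending list: the clamped top two
theorem foldl_maxStepA_sorted (l : List Int) (hp : l.Pairwise (fun a b => b ≤ a)) :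
    l.foldl maxStepA (0, 0) = (max (l.headD 0) 0, max ((l.drop 1).headD 0) 0) := by
  match l with
  | [] => rfl
  | [x] =>
      simp only [List.foldl_cons, List.foldl_nil, maxStepA]
      split_ifs <;> simp <;> omega
  | x :: y :: t =>
      rw [List.pairwise_cons] at hp
      obtain ⟨hx, hp⟩ := hp
      rw [List.pairwise_cons] at hp
      obtain ⟨hy, _⟩ := hp
      have hyx : y ≤ x := hx y (by simp)
      have h1 : maxStepA (0, 0) x = (max x 0, 0) := by
        simp only [maxStepA]; split_ifs <;> simp <;> omega
      have h2 : maxStepA (max x 0, 0) y = (max x 0, max y 0) := by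
        simp only [maxStepA]; split_ifs <;> simp <;> omega
      simp only [List.foldl_cons, h1, h2, List.headD, List.drop]
      exact foldl_maxStepA_const t (max x 0) (max y 0)
        (fun z hz => ⟨le_trans (le_trans (hy z hz) hyx) (le_max_left _ _),
                      le_trans (hy z hz) (le_max_left _ _)⟩)

theorem fold_eq_sorted (xs : List Int) :
    xs.foldl maxStepA (0, 0) =
      (PySem.List.sorted xs (fun x => x) true).foldl maxStepA (0, 0) := by
  have hperm : (PySem.List.sorted xs (fun x => x) true).Perm xs :=
    PySem.List.sorted_perm xs _ true
  haveI : RightCommutative maxStepA := ⟨fun b a a' => maxStepA_comm b a a'⟩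
  exact List.Perm.foldl_eq hperm.symm (0, 0)

-- ===== VERDICT (by name: the statement is the Claim_ definition above) =====
theorem max_problem_spec : Claim_equal_max_problem := by
  intro data_list max_type _
  unfold Spec_max_problem max_problem max_problem_alt
  have hp : (PySem.List.sorted data_list (fun x => x) true).Pairwise (fun a b => b ≤ a) :=
    PySem.List.sorted_pairwise_rev data_list (fun x => x)
  rw [fold_eq_sorted]
  generalize hs : PySem.List.sorted data_list (fun x => x) true = s at hp ⊢
  rw [foldl_maxStepA_sorted s hp]
  match s with
  | [] => rfl
  | [x] => rfl
  | x :: y :: t => rfl
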